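-- pv_equiv track=rewrite | github.com/luithw/structure_of_reality | scripts/publish_to_facebook.py | extract_excerpt
-- ===== SOURCE A (Python) =====
-- def extract_excerpt(content, max_length=200):
--     """Extract a short excerpt from the content."""
--     # Remove markdown formatting
--     content = content.replace('#', '').replace('*', '').replace('_', '')
--     lines = content.split('\n')
--
--     # Get first meaningful paragraph
--     for line in lines:
--         line = line.strip()
--         if line and len(line) > 50:
--             if len(line) > max_length:
--                 return line[:max_length] + "..."
--             return line
--
--     # Fallback to first non-empty line
--     for line in lines:
--         line = line.strip()
--         if line:
--             if len(line) > max_length: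
--                 return line[:max_length] + "..."
--             return line
--
--     return ""
-- ===== SOURCE B (Python) =====
-- def extract_excerpt(content, max_length=200):
--     """Extract a short excerpt from the content (single pass with a fallback)."""
--     text = content.replace('#', '').replace('*', '').replace('_', '')
--     fallback = None
--     for line in text.split('\n'):
--         s = line.strip()
--         if len(s) > 50:
--             return s[:max_length] + "..." if len(s) > max_length else s
--         if s and fallback is None:
--             fallback = s
--     if fallback is not None:
--         return fallback[:max_length] + "..." if len(fallback) > max_length else fallback
--     return ""
-- ===== Notes on version B (the rewrite author's own statement) =====
-- stated objective: alternative
-- what changed: Replaces A's two sequential scans over the lines (first for a line longer than 50 chars, then again for the first non-empty line) by a single pass that records the first non-empty stripped line as a fallback while scanning for a long line.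
import Mathlib
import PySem

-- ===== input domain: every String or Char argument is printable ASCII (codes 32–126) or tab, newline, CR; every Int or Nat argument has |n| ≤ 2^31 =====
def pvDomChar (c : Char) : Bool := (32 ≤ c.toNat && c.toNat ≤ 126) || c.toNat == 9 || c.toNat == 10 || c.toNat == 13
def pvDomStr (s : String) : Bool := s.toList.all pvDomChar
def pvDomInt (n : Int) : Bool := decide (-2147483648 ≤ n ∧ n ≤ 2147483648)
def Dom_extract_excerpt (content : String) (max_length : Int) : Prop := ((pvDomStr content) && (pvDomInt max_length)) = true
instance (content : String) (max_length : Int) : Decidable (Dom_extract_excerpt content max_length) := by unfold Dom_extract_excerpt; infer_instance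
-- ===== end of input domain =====

-- B replaces A's two sequential scans over the lines by a single pass that records the
-- first non-empty stripped line as a fallback while scanning for a line longer than 50.

-- ===== PORT A =====
-- first loop of A: first stripped line that is non-empty and longer than 50, truncated
def pvLoopA1 (lines : List String) (max_length : Int) : Option String :=
  match lines with
  | [] => none
  | l :: rest =>
    let line := PySem.Str.strip l
    if line ≠ "" ∧ PySem.Str.len line > 50 then
      some (if PySem.Str.len line > max_length then
              PySem.Str.slice line none (some max_length) ++ "..." else line)
    else pvLoopA1 rest max_length

-- second loop of A: first non-empty stripped line, truncated
def pvLoopA2 (lines : List String) (max_length : Int) : Option String :=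
  match lines with
  | [] => none
  | l :: rest =>
    let line := PySem.Str.strip l
    if line ≠ "" then
      some (if PySem.Str.len line > max_length then
              PySem.Str.slice line none (some max_length) ++ "..." else line)
    else pvLoopA2 rest max_length

def extract_excerpt (content : String) (max_length : Int) : String :=
  let content := PySem.Str.replace (PySem.Str.replace (PySem.Str.replace content "#" "") "*" "") "_" ""
  let lines := (PySem.Str.split? content "\n").getD []
  match pvLoopA1 lines max_length with
  | some r => r
  | none =>
    match pvLoopA2 lines max_length with
    | some r => r
    | none => ""

-- ===== PORT B =====
def pvTrunc (s : String) (max_length : Int) : String :=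
  if PySem.Str.len s > max_length then
    PySem.Str.slice s none (some max_length) ++ "..." else s

def pvLoopB (lines : List String) (max_length : Int) (fallback : Option String) : String :=
  match lines with
  | [] =>
    match fallback with
    | some f => pvTrunc f max_length
    | none => ""
  | l :: rest =>
    let s := PySem.Str.strip l
    if PySem.Str.len s > 50 then pvTrunc s max_length
    else if s ≠ "" ∧ fallback = none then pvLoopB rest max_length (some s)
    else pvLoopB rest max_length fallback

def extract_excerpt_alt (content : String) (max_length : Int) : String :=
  let text := PySem.Str.replace (PySem.Str.replace (PySem.Str.replace content "#" "") "*" "") "_" ""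
  pvLoopB ((PySem.Str.split? text "\n").getD []) max_length none

-- ===== PRECONDITION & SPEC =====
def Spec_extract_excerpt (content : String) (max_length : Int) (out : String) : Prop := out = extract_excerpt_alt content max_length
instance (content : String) (max_length : Int) (out : String) : Decidable (Spec_extract_excerpt content max_length out) := by unfold Spec_extract_excerpt; infer_instance

-- ===== CLAIM (what is proved, stated in full; the proofs are below) =====
def Claim_equal_extract_excerpt : Prop := ∀ (content : String) (max_length : Int), Dom_extract_excerpt content max_length → Spec_extract_excerpt content max_length (extract_excerpt content max_length)

-- ===== LEMMAS AND PROOFS =====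

theorem pvLen_pos_ne_empty (s : String) (h : 50 < (PySem.Chars.strip s.toList).length) :
    PySem.Str.strip s ≠ "" := by
  intro he
  have : (PySem.Str.strip s).toList = [] := by rw [he]; rfl
  rw [PySem.Str.toList_strip] at this
  rw [this] at h
  simp at h

theorem pvLoopB_eq (lines : List String) (m : Int) (fb : Option String) :
    pvLoopB lines m fb =
      (pvLoopA1 lines m).getD
        (match fb with
         | some f => pvTrunc f m
         | none => (pvLoopA2 lines m).getD "") := by
  induction lines generalizing fb with
  | nil => cases fb <;> simp [pvLoopB, pvLoopA1, pvLoopA2]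
  | cons l rest ih =>
    by_cases h50 : 50 < (PySem.Chars.strip l.toList).length
    · have hne : PySem.Str.strip l ≠ "" := pvLen_pos_ne_empty _ h50
      simp [pvLoopB, pvLoopA1, h50, hne, pvTrunc]
    · by_cases hne : PySem.Str.strip l ≠ ""
      · cases fb with
        | none => simp [pvLoopB, pvLoopA1, pvLoopA2, h50, hne, ih, pvTrunc]
        | some f => simp [pvLoopB, pvLoopA1, h50, hne, ih]
      · simp only [ne_eq, not_not] at hne
        cases fb <;> simp [pvLoopB, pvLoopA1, pvLoopA2, hne, ih]

theorem pvMain (lines : List String) (m : Int) :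
    pvLoopB lines m none =
      (match pvLoopA1 lines m with
       | some r => r
       | none =>
         match pvLoopA2 lines m with
         | some r => r
         | none => "") := by
  rw [pvLoopB_eq]
  cases pvLoopA1 lines m <;> cases pvLoopA2 lines m <;> simp

-- ===== VERDICT (by name: the statement is the Claim_ definition above) =====
theorem extract_excerpt_spec : Claim_equal_extract_excerpt := by
  intro content m _
  unfold Spec_extract_excerpt
  simp only [extract_excerpt, extract_excerpt_alt]
  rw [pvMain]
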